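-- pv_equiv track=rewrite | github.com/wiredvibez/callcenter_fileanalyzer | analyze_calls.py | node_funnel
-- ===== SOURCE A (Python) =====
-- from collections import defaultdict, Counter
-- from typing import Dict, List, Any, Tuple, Optional
--
-- def path_rule_ids(path: List[Dict[str, Any]]) -> List[int]:
--     return [int(step["rule_id"]) for step in path if "rule_id" in step]
--
-- def node_funnel(paths: List[Dict[str, Any]]) -> Dict[int, Dict[str, int]]:
--     # For each node: reach (occurrences), transitions (sum of next), drop_off = reach - transitions
--     reach: Counter = Counter()
--     transitions: Dict[int, Counter] = defaultdict(Counter)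
--     for p in paths:
--         rids = path_rule_ids(p["path"])
--         for i, rid in enumerate(rids):
--             reach[rid] += 1
--             if i < len(rids) - 1:
--                 transitions[rid][rids[i + 1]] += 1
--     result: Dict[int, Dict[str, int]] = {}
--     for rid, r in reach.items():
--         trans_sum = sum(transitions.get(rid, {}).values())
--         result[rid] = {
--             "reach": r,
--             "transitions": trans_sum,
--             "drop_off": r - trans_sum,
--         }
--     return result
-- ===== SOURCE B (Python) =====
-- from collections import Counter
-- from typing import Dict, List, Any
--
-- def path_rule_ids(path: List[Dict[str, Any]]) -> List[int]:
--     return [int(step["rule_id"]) for step in path if "rule_id" in step]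
--
-- def node_funnel(paths: List[Dict[str, Any]]) -> Dict[int, Dict[str, int]]:
--     # Every occurrence of a node either has a successor (a transition) or is the
--     # last step of its path (a drop-off): so count reach per occurrence and
--     # drop-offs once per path, and derive transitions = reach - drop_off.
--     reach: Counter = Counter()
--     drop: Counter = Counter()
--     for p in paths:
--         rids = path_rule_ids(p["path"])
--         reach.update(rids)
--         if rids:
--             drop[rids[-1]] += 1
--     return {
--         rid: {"reach": r, "transitions": r - drop[rid], "drop_off": drop[rid]}
--         for rid, r in reach.items()
--     }
-- ===== Notes on version B (the rewrite author's own statement) =====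
-- stated objective: simpler
-- what changed: Replaces the per-node Counter-of-next-nodes (and its later sum over values) with a single drop-off Counter bumped once per path at its last rule_id, deriving transitions = reach - drop_off from the identity that every occurrence either has a successor or ends its path.
import Mathlib
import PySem

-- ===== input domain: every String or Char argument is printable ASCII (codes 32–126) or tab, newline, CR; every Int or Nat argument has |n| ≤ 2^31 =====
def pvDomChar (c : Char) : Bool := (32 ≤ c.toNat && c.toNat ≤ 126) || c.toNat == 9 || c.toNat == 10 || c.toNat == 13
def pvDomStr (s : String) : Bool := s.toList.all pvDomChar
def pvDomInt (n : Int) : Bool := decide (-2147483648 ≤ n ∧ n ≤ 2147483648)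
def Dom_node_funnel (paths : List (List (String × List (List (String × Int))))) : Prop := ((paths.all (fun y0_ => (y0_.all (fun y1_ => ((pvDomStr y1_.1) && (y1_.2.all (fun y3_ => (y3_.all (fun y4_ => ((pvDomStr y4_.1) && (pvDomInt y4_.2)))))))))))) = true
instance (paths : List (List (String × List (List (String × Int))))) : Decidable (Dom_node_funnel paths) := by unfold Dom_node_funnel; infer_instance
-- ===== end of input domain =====

-- B replaces A's per-node next-node Counters with one drop-off counter bumped once per
-- path at its last rule id, deriving transitions = reach - drop_off (objective: simpler).


-- ===== PORT A =====
-- [int(step["rule_id"]) for step in path if "rule_id" in step]  (int() is the identity on int)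
def pathRuleIds (path : List (List (String × Int))) : List Int :=
  (path.filter (fun step => (PySem.Dict.mk step).contains "rule_id")).map
    (fun step => (PySem.Dict.mk step).getD "rule_id" 0)

-- A's inner loop 'for i, rid in enumerate(rids)': rids[i+1] (read only when i < len-1)
-- is exactly the head of the suffix following rid, so the loop walks the list carrying it.
def loopA (st : PySem.Dict Int Int × PySem.Dict Int (PySem.Dict Int Int)) :
    List Int → PySem.Dict Int Int × PySem.Dict Int (PySem.Dict Int Int)
  | [] => st
  | rid :: rest =>
    let reach' := st.1.modify rid 0 (· + 1)          -- reach[rid] += 1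
    let trans' :=
      match rest with
      | [] => st.2                                   -- i = len(rids) - 1: no transition
      | nxt :: _ =>                                  -- transitions[rid][rids[i+1]] += 1
        st.2.modify rid PySem.Dict.empty (fun c => c.modify nxt 0 (· + 1))
    loopA (reach', trans') rest

-- the body of A's 'for p in paths' loop; p["path"] (KeyError when absent) is excluded by Pre_
def stepA (st : PySem.Dict Int Int × PySem.Dict Int (PySem.Dict Int Int))
    (p : List (String × List (List (String × Int)))) :
    PySem.Dict Int Int × PySem.Dict Int (PySem.Dict Int Int) :=
  loopA st (pathRuleIds ((PySem.Dict.mk p).getD "path" []))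

def node_funnel (paths : List (List (String × List (List (String × Int))))) : List (Int × List (String × Int)) :=
  let st := paths.foldl stepA (PySem.Dict.empty, PySem.Dict.empty)
  let result := st.1.items.foldl
    (fun res pr =>
      -- trans_sum = sum(transitions.get(rid, {}).values())
      res.insert pr.1 [("reach", pr.2),
                       ("transitions", ((st.2.getD pr.1 PySem.Dict.empty).values).sum),
                       ("drop_off", pr.2 - ((st.2.getD pr.1 PySem.Dict.empty).values).sum)])
    (PySem.Dict.empty : PySem.Dict Int (List (String × Int)))
  result.items

-- ===== PORT B =====
-- the body of B's 'for p in paths' loop; p["path"] (KeyError when absent) is excluded by Pre_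
def stepB (st : PySem.Dict Int Int × PySem.Dict Int Int)
    (p : List (String × List (List (String × Int)))) :
    PySem.Dict Int Int × PySem.Dict Int Int :=
  let rids := pathRuleIds ((PySem.Dict.mk p).getD "path" [])
  (rids.foldl (fun d x => d.modify x 0 (· + 1)) st.1,   -- reach.update(rids)
   match rids.getLast? with                             -- if rids: drop[rids[-1]] += 1
   | some lastR => st.2.modify lastR 0 (· + 1)
   | none => st.2)

def node_funnel_alt (paths : List (List (String × List (List (String × Int))))) : List (Int × List (String × Int)) :=
  let st := paths.foldl stepB (PySem.Dict.empty, PySem.Dict.empty)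
  -- dict comprehension over reach.items(): its keys are distinct, so it is the list of pairs
  st.1.items.map (fun pr =>
    (pr.1, [("reach", pr.2), ("transitions", pr.2 - st.2.getD pr.1 0), ("drop_off", st.2.getD pr.1 0)]))

-- ===== PRECONDITION & SPEC =====
-- Pre_ excludes exactly the inputs where A raises KeyError: a path dict without a "path" key.
def Pre_node_funnel (paths : List (List (String × List (List (String × Int))))) : Prop :=
  ∀ p ∈ paths, (PySem.Dict.mk p).contains "path" = true
instance (paths : List (List (String × List (List (String × Int))))) : Decidable (Pre_node_funnel paths) := by unfold Pre_node_funnel; infer_instance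

def pvWitness_node_funnel : (List (List (String × List (List (String × Int))))) :=
  [[("path", [[("rule_id", 1)], [("rule_id", 2)], [("rule_id", 1)]])],
   [("path", [[("rule_id", 2), ("t", 0)], [("other", 5)]])]]

def Spec_node_funnel (paths : List (List (String × List (List (String × Int))))) (out : List (Int × List (String × Int))) : Prop := out = node_funnel_alt paths
instance (paths : List (List (String × List (List (String × Int))))) (out : List (Int × List (String × Int))) : Decidable (Spec_node_funnel paths out) := by unfold Spec_node_funnel; infer_instance

-- ===== CLAIM (what is proved, stated in full; the proofs are below) =====
def Claim_equal_node_funnel : Prop := ∀ (paths : List (List (String × List (List (String × Int))))), Dom_node_funnel paths → Pre_node_funnel paths → Spec_node_funnel paths (node_funnel paths)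

-- ===== LEMMAS AND PROOFS =====

-- sum of a counter's values
def sumV (c : PySem.Dict Int Int) : Int := c.values.sum

-- number of non-final occurrences of r in l (occurrences that have a successor)
def ntc : List Int → Int → Int
  | [], _ => 0
  | [_], _ => 0
  | x :: y :: t, r => (if x = r then 1 else 0) + ntc (y :: t) r

theorem loopA_nil (st : PySem.Dict Int Int × PySem.Dict Int (PySem.Dict Int Int)) :
    loopA st [] = st := rfl

theorem loopA_single (st : PySem.Dict Int Int × PySem.Dict Int (PySem.Dict Int Int)) (rid : Int) :
    loopA st [rid] = (st.1.modify rid 0 (· + 1), st.2) := rfl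

theorem loopA_cons2 (st : PySem.Dict Int Int × PySem.Dict Int (PySem.Dict Int Int))
    (rid nxt : Int) (t : List Int) :
    loopA st (rid :: nxt :: t)
      = loopA (st.1.modify rid 0 (· + 1),
               st.2.modify rid PySem.Dict.empty (fun c => c.modify nxt 0 (· + 1))) (nxt :: t) := rfl

theorem ntc_add_last (l : List Int) (r : Int) :
    ntc l r + (if l.getLast? = some r then 1 else 0) = (l.count r : Int) := by
  induction l with
  | nil => simp [ntc]
  | cons x t ih =>
    cases t with
    | nil =>
      simp only [ntc, List.getLast?_singleton, List.count_cons, List.count_nil]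
      by_cases h : x = r
      · subst h; simp
      · have hb : (x == r) = false := by simp [h]
        have hs : ¬ (some x = some r) := by simp [h]
        rw [hb, if_neg hs]
        simp
    | cons y s =>
      rw [List.getLast?_cons_cons, List.count_cons]
      simp only [ntc]
      have hcnt : ∀ n : Nat, (n + if (x == r) = true then 1 else 0 : Nat)
          = n + (if x = r then 1 else 0) := by
        intro n; by_cases h : x = r <;> simp [h]
      rw [hcnt]
      by_cases hlast : (y :: s).getLast? = some r
      · rw [if_pos hlast]
        rw [if_pos hlast] at ih
        by_cases h : x = r
        · rw [if_pos h]; push_cast [h]; omega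
        · rw [if_neg h]; push_cast [h]; omega
      · rw [if_neg hlast]
        rw [if_neg hlast] at ih
        by_cases h : x = r
        · rw [if_pos h]; push_cast [h]; omega
        · rw [if_neg h]; push_cast [h]; omega

theorem map_replace_id (l : List (Int × Int)) (y v : Int)
    (h : ∀ p ∈ l, p.1 ≠ y) :
    l.map (fun p => if (p.1 == y) = true then (y, v) else p) = l := by
  induction l with
  | nil => rfl
  | cons p t ih =>
    have hp : (p.1 == y) = false := by
      simp only [beq_eq_false_iff_ne, ne_eq]
      exact h p List.mem_cons_self
    rw [List.map_cons, ih (fun q hq => h q (List.mem_cons_of_mem _ hq))]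
    simp [hp]

theorem sum_snd_bump (l : List (Int × Int)) (y : Int)
    (hnd : (l.map Prod.fst).Nodup) (hc : ∃ p ∈ l, p.1 = y) :
    ((l.map (fun p => if (p.1 == y) = true then
        (y, (Option.map Prod.snd (l.find? (fun p => p.1 == y))).getD 0 + 1) else p)).map Prod.snd).sum
      = (l.map Prod.snd).sum + 1 := by
  induction l with
  | nil => simp at hc
  | cons p t ih =>
    rw [List.map_cons] at hnd
    by_cases hp : p.1 = y
    · have hpb : (p.1 == y) = true := by simp [hp]
      have hrest : ∀ q ∈ t, q.1 ≠ y := by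
        intro q hq hqy
        have hmem : q.1 ∈ t.map Prod.fst := List.mem_map_of_mem hq
        rw [hqy, ← hp] at hmem
        exact (List.nodup_cons.mp hnd).1 hmem
      have hw : ((p :: t).find? (fun q => q.1 == y)) = some p :=
        List.find?_cons_of_pos hpb
      rw [hw]
      have htl := map_replace_id t y ((Option.map Prod.snd (some p)).getD 0 + 1) hrest
      rw [List.map_cons, if_pos hpb, htl, List.map_cons, List.map_cons,
        List.sum_cons, List.sum_cons]
      simp only [Option.map_some, Option.getD_some]
      ring
    · have hpb : (p.1 == y) = false := by simp [hp]
      have hw : ((p :: t).find? (fun q => q.1 == y)) = t.find? (fun q => q.1 == y) :=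
        List.find?_cons_of_neg (by simp [hpb])
      have hc' : ∃ q ∈ t, q.1 = y := by
        rcases hc with ⟨q, hq, hqy⟩
        rcases List.mem_cons.mp hq with rfl | hq'
        · exact absurd hqy hp
        · exact ⟨q, hq', hqy⟩
      have := ih (List.nodup_cons.mp hnd).2 hc'
      rw [hw, List.map_cons, if_neg (by simp [hpb]), List.map_cons, List.map_cons,
        List.sum_cons, List.sum_cons, this]
      ring

theorem sumV_modify_add_one (c : PySem.Dict Int Int) (h : c.keys.Nodup) (y : Int) :
    sumV (c.modify y 0 (· + 1)) = sumV c + 1 := by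
  show sumV (c.insert y (c.getD y 0 + 1)) = sumV c + 1
  by_cases hc : c.contains y = true
  · have hmem : ∃ p ∈ c.items, p.1 = y := by
      simpa [PySem.Dict.contains, List.any_eq_true, beq_iff_eq] using hc
    have hval : c.getD y 0 = (Option.map Prod.snd (c.items.find? (fun p => p.1 == y))).getD 0 := by
      simp [PySem.Dict.getD, PySem.Dict.get?]
    simp only [sumV, PySem.Dict.values, PySem.Dict.items_insert_of_contains c _ hc, hval]
    exact sum_snd_bump c.items y (by simpa [PySem.Dict.keys] using h) hmem
  · have hc' : c.contains y = false := by simpa using hc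
    simp [sumV, PySem.Dict.values, PySem.Dict.items_insert_of_not_contains c _ hc',
      PySem.Dict.getD_of_not_contains c 0 hc']

-- all inner counters of a transitions dict have unique keys
def NI (tr : PySem.Dict Int (PySem.Dict Int Int)) : Prop :=
  ∀ r, (tr.getD r PySem.Dict.empty).keys.Nodup

theorem loopA_fst (rids : List Int) :
    ∀ st, (loopA st rids).1 = rids.foldl (fun d x => d.modify x 0 (· + 1)) st.1 := by
  induction rids with
  | nil => intro st; rfl
  | cons rid rest ih =>
    intro st
    cases rest with
    | nil => rw [loopA_single]; rfl
    | cons nxt t => rw [loopA_cons2, ih]; rfl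

theorem loopA_snd (rids : List Int) :
    ∀ st, NI st.2 →
      NI (loopA st rids).2 ∧
      ∀ r, sumV ((loopA st rids).2.getD r PySem.Dict.empty)
           = sumV (st.2.getD r PySem.Dict.empty) + ntc rids r := by
  induction rids with
  | nil => intro st hni; exact ⟨hni, fun r => by rw [loopA_nil]; simp [ntc]⟩
  | cons rid rest ih =>
    intro st hni
    cases rest with
    | nil =>
      rw [loopA_single]
      exact ⟨hni, fun r => by simp [ntc]⟩
    | cons nxt t =>
      rw [loopA_cons2]
      have hni' : NI (st.2.modify rid PySem.Dict.empty (fun c => c.modify nxt 0 (· + 1))) := by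
        intro r
        rw [PySem.Dict.getD_modify]
        by_cases hr : r = rid
        · rw [if_pos hr]
          exact PySem.Dict.nodup_keys_insert _ _ _ (hni rid)
        · rw [if_neg hr]
          exact hni r
      obtain ⟨h1, h2⟩ := ih (st.1.modify rid 0 (· + 1),
        st.2.modify rid PySem.Dict.empty (fun c => c.modify nxt 0 (· + 1))) hni'
      refine ⟨h1, fun r => ?_⟩
      rw [h2 r]
      show sumV ((st.2.modify rid PySem.Dict.empty
        (fun c => c.modify nxt 0 (· + 1))).getD r PySem.Dict.empty) + ntc (nxt :: t) r = _
      rw [PySem.Dict.getD_modify]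
      by_cases hr : r = rid
      · rw [if_pos hr, hr, sumV_modify_add_one _ (hni rid) nxt]
        simp only [ntc]
        norm_num
        ring
      · rw [if_neg hr]
        have hne : ¬ rid = r := fun h => hr h.symm
        simp only [ntc]
        rw [if_neg hne]
        ring

-- joint loop invariant of A's and B's states over the per-path folds
def InvP (a : PySem.Dict Int Int × PySem.Dict Int (PySem.Dict Int Int))
    (b : PySem.Dict Int Int × PySem.Dict Int Int) : Prop :=
  a.1 = b.1 ∧ a.1.keys.Nodup ∧ NI a.2 ∧
  (∀ r, sumV (a.2.getD r PySem.Dict.empty) + b.2.getD r 0 = a.1.getD r 0)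

theorem fold_inv (paths : List (List (String × List (List (String × Int))))) :
    ∀ stA stB, InvP stA stB → InvP (paths.foldl stepA stA) (paths.foldl stepB stB) := by
  induction paths with
  | nil => intro stA stB h; exact h
  | cons p ps ih =>
    intro stA stB h
    obtain ⟨h1, h2, h3, h4⟩ := h
    rw [List.foldl_cons, List.foldl_cons]
    apply ih
    obtain ⟨hA1, hA2⟩ := loopA_snd (pathRuleIds ((PySem.Dict.mk p).getD "path" [])) stA h3
    refine ⟨?_, ?_, hA1, ?_⟩
    · show (loopA stA _).1 = _
      rw [loopA_fst, h1]
      rfl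
    · show (loopA stA _).1.keys.Nodup
      rw [loopA_fst]
      exact PySem.Dict.nodup_keys_foldl_modify_key _ id 0 (fun _ _ => (· + 1)) stA.1 h2
    · intro r
      show sumV ((loopA stA _).2.getD r PySem.Dict.empty) + (stepB stB p).2.getD r 0
          = (loopA stA _).1.getD r 0
      rw [hA2 r, loopA_fst, PySem.Dict.getD_foldl_modify_add_one]
      have hntc := ntc_add_last (pathRuleIds ((PySem.Dict.mk p).getD "path" [])) r
      have h4r := h4 r
      cases hl : (pathRuleIds ((PySem.Dict.mk p).getD "path" [])).getLast? with
      | none =>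
        have hsB : (stepB stB p).2 = stB.2 := by simp [stepB, hl]
        rw [hl, if_neg (by simp)] at hntc
        rw [hsB]
        omega
      | some lastR =>
        have hsB : (stepB stB p).2 = stB.2.modify lastR 0 (· + 1) := by simp [stepB, hl]
        rw [hsB, PySem.Dict.getD_modify]
        rw [hl] at hntc
        by_cases hr : r = lastR
        · subst hr
          rw [if_pos rfl]
          rw [if_pos rfl] at hntc
          omega
        · rw [if_neg hr]
          rw [if_neg (by intro hh; exact hr (Option.some_inj.mp hh).symm)] at hntc
          omega

-- ===== VERDICT (by name: the statement is the Claim_ definition above) =====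
theorem node_funnel_spec : Claim_equal_node_funnel := by
  intro paths _ _
  show node_funnel paths = node_funnel_alt paths
  have inv := fold_inv paths (PySem.Dict.empty, PySem.Dict.empty) (PySem.Dict.empty, PySem.Dict.empty)
    ⟨rfl, PySem.Dict.nodup_keys_empty,
     fun r => by simp [PySem.Dict.getD, PySem.Dict.get?, PySem.Dict.keys, PySem.Dict.empty],
     fun r => by simp [sumV, PySem.Dict.getD, PySem.Dict.get?, PySem.Dict.values, PySem.Dict.empty]⟩
  obtain ⟨hfst, hnd, hni, hsum⟩ := inv
  set A := paths.foldl stepA (PySem.Dict.empty, PySem.Dict.empty) with hA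
  set B := paths.foldl stepB (PySem.Dict.empty, PySem.Dict.empty) with hB
  show (A.1.items.foldl
      (fun res pr =>
        res.insert pr.1 [("reach", pr.2),
                         ("transitions", ((A.2.getD pr.1 PySem.Dict.empty).values).sum),
                         ("drop_off", pr.2 - ((A.2.getD pr.1 PySem.Dict.empty).values).sum)])
      PySem.Dict.empty).items
    = B.1.items.map (fun pr =>
        (pr.1, [("reach", pr.2), ("transitions", pr.2 - B.2.getD pr.1 0), ("drop_off", B.2.getD pr.1 0)]))
  rw [PySem.Dict.items_foldl_insert_fresh A.1.items Prod.fst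
      (fun pr => [("reach", pr.2),
                  ("transitions", ((A.2.getD pr.1 PySem.Dict.empty).values).sum),
                  ("drop_off", pr.2 - ((A.2.getD pr.1 PySem.Dict.empty).values).sum)])
      PySem.Dict.empty
      (fun _ _ => PySem.Dict.contains_empty _)
      (by exact hnd),
    ← hfst]
  show [] ++ _ = _
  rw [List.nil_append]
  apply List.map_congr_left
  intro pr hpr
  have hval : A.1.getD pr.1 0 = pr.2 := PySem.Dict.getD_of_mem_items A.1 hpr hnd 0
  have hs := hsum pr.1
  rw [hval] at hs
  simp only [sumV] at hs
  have hts : ((A.2.getD pr.1 PySem.Dict.empty).values).sum = pr.2 - B.2.getD pr.1 0 := by omega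
  rw [hts]
  have hd : pr.2 - (pr.2 - B.2.getD pr.1 0) = B.2.getD pr.1 0 := by ring
  rw [hd]
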